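-- pv_equiv track=rewrite | github.com/DaxNad/Prometeo- | backend/app/services/llm_service.py | _validate_ai_response
-- ===== SOURCE A (Python) =====
-- def _validate_ai_response(response: str) -> str:
--     invalid_patterns = [
--         "componente zaw",
--         "componenti zaw",
--         "zaw-1 come componente",
--         "zaw-2 come componente",
--     ]
--
--     if any(pat in response.lower() for pat in invalid_patterns):
--         return (
--             "ERRORE_LOGICO_PROMETEO: ZAW-1 e ZAW-2 sono postazioni, non componenti. "
--             "Risposta AI non valida. Ripetere analisi considerando ZAW come stazioni produttive."
--         )
--
--     return response
-- ===== SOURCE B (Python) =====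
-- def _validate_ai_response(response: str) -> str:
--     patterns = (
--         "componente zaw",
--         "componenti zaw",
--         "zaw-1 come componente",
--         "zaw-2 come componente",
--     )
--     low = response.lower()
--     for i in range(len(low)):
--         if low.startswith(patterns, i):
--             return (
--                 "ERRORE_LOGICO_PROMETEO: ZAW-1 e ZAW-2 sono postazioni, non componenti. "
--                 "Risposta AI non valida. Ripetere analisi considerando ZAW come stazioni produttive."
--             )
--     return response
-- ===== Notes on version B (the rewrite author's own statement) =====
-- stated objective: alternative
-- what changed: B lowercases once and makes a single forward scan over the string, testing at each position whether any of the four patterns starts there (str.startswith with a tuple and start index), instead of A's four independent full substring scans.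
import Mathlib
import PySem

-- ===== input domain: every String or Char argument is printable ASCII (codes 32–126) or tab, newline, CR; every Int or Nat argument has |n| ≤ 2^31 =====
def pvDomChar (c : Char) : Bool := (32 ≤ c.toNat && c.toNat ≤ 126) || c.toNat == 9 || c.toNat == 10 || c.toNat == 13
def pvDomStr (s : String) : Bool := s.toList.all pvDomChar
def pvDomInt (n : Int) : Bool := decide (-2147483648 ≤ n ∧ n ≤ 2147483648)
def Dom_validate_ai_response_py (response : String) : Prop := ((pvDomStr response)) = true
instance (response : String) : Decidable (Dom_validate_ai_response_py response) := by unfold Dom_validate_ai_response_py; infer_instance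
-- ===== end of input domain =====

-- B replaces the four independent substring scans by one forward scan that checks all
-- patterns at each position (str.startswith with a tuple and a start index); objective: idiomatic/alternative, same output.

-- ===== PORT A =====
def pvErrMsg : String :=
  "ERRORE_LOGICO_PROMETEO: ZAW-1 e ZAW-2 sono postazioni, non componenti. Risposta AI non valida. Ripetere analisi considerando ZAW come stazioni produttive."

def validate_ai_response_py (response : String) : String :=
  let invalid_patterns : List String :=
    ["componente zaw", "componenti zaw", "zaw-1 come componente", "zaw-2 come componente"]
  if invalid_patterns.any (fun pat => PySem.Str.isIn pat (PySem.Str.lower response)) then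
    pvErrMsg
  else
    response

-- ===== PORT B =====
def pvPatterns : List String :=
  ["componente zaw", "componenti zaw", "zaw-1 come componente", "zaw-2 come componente"]

-- the loop 'for i in range(len(low)): if low.startswith(patterns, i)', as suffix recursion
def pvScan : List Char → Bool
  | [] => false
  | c :: rest =>
      pvPatterns.any (fun p => PySem.Chars.startswith (c :: rest) p.toList) || pvScan rest

def validate_ai_response_py_alt (response : String) : String :=
  let low := PySem.Str.lower response
  if pvScan low.toList then
    pvErrMsg
  else
    response

-- ===== PRECONDITION & SPEC =====
def Spec_validate_ai_response_py (response : String) (out : String) : Prop := out = validate_ai_response_py_alt response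
instance (response : String) (out : String) : Decidable (Spec_validate_ai_response_py response out) := by unfold Spec_validate_ai_response_py; infer_instance

-- ===== CLAIM (what is proved, stated in full; the proofs are below) =====
def Claim_equal_validate_ai_response_py : Prop := ∀ (response : String), Dom_validate_ai_response_py response → Spec_validate_ai_response_py response (validate_ai_response_py response)

-- ===== LEMMAS AND PROOFS =====

lemma pvScan_iff (cs : List Char) :
    pvScan cs = true ↔ ∃ p ∈ pvPatterns, p.toList <:+: cs := by
  induction cs with
  | nil => simp [pvScan]; decide
  | cons c rest ih =>
      simp only [pvScan, Bool.or_eq_true, List.any_eq_true,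
        PySem.Chars.startswith_iff, ih, List.infix_cons_iff]
      constructor
      · rintro (⟨p, hp, h⟩ | ⟨p, hp, h⟩)
        · exact ⟨p, hp, Or.inl h⟩
        · exact ⟨p, hp, Or.inr h⟩
      · rintro ⟨p, hp, h | h⟩
        · exact Or.inl ⟨p, hp, h⟩
        · exact Or.inr ⟨p, hp, h⟩

lemma pvCond_eq (s : String) :
    (pvPatterns.any (fun pat => PySem.Str.isIn pat s)) = pvScan s.toList := by
  rw [Bool.eq_iff_iff]
  simp only [List.any_eq_true, PySem.Str.isIn_iff_infix, pvScan_iff]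

-- ===== VERDICT (by name: the statement is the Claim_ definition above) =====
theorem validate_ai_response_py_spec : Claim_equal_validate_ai_response_py := by
  intro response _
  unfold Spec_validate_ai_response_py validate_ai_response_py validate_ai_response_py_alt
  show (if (pvPatterns.any fun pat => PySem.Str.isIn pat (PySem.Str.lower response)) = true then pvErrMsg else response) = _
  rw [pvCond_eq]
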